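-- pv_equiv track=rewrite | github.com/dan0102dan/PyEGE | different/knights_move.py | generateDesk
-- ===== SOURCE A (Python) =====
-- def generateDesk(initially, modified):
-- 	desk = []
-- 	for desk_y in range(1, 9):
-- 		desk.append([])
-- 		for desk_x in range(1, 9):
-- 			if (desk_x == initially[0]) and (desk_y == initially[1]):
-- 				desk[desk_y - 1].append('❌')
-- 			elif (desk_x == modified[0]) and (desk_y == modified[1]):
-- 				desk[desk_y - 1].append('❎')
-- 			else:
-- 				desk[desk_y - 1].append('⬛')
--
-- 	return desk
-- ===== SOURCE B (Python) =====
-- def generateDesk(initially, modified):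
--     desk = [['⬛'] * 8 for _ in range(8)]
--     for (x, y), mark in ((modified, '❎'), (initially, '❌')):
--         if 1 <= x <= 8 and 1 <= y <= 8:
--             desk[y - 1][x - 1] = mark
--     return desk
-- ===== Notes on version B (the rewrite author's own statement) =====
-- stated objective: simpler
-- what changed: B builds a uniform 8x8 board of '⬛' and patches at most two squares by direct assignment (modified first, then initially, so coinciding coordinates keep the '❌' priority), replacing A's 64-iteration nested loop with per-cell branching.
import Mathlib
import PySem

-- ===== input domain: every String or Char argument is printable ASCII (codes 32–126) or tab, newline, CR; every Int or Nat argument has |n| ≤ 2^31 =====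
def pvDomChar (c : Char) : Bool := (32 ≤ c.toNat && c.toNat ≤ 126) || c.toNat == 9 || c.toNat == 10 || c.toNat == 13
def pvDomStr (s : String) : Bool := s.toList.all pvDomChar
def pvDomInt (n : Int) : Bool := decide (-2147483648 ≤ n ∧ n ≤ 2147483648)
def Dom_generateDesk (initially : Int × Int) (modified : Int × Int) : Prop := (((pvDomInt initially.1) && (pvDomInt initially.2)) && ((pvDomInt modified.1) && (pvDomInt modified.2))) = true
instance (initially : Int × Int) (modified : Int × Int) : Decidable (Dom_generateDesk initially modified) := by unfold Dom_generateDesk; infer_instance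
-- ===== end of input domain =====

-- B builds a uniform 8x8 board and patches at most two squares by direct guarded
-- assignment (modified first, then initially) instead of branching in a nested loop;
-- objective: simpler.


-- ===== PORT A =====
-- A appends an empty row, then appends each cell to that (last) row; ported as
-- building the row with the same inner loop and appending it.
def generateDesk (initially : Int × Int) (modified : Int × Int) : List (List String) :=
  (PySem.List.pyRange 1 9 1).foldl (fun desk desk_y =>
    desk ++ [ (PySem.List.pyRange 1 9 1).foldl (fun row desk_x =>
      row ++ [ if desk_x = initially.1 ∧ desk_y = initially.2 then "❌"
               else if desk_x = modified.1 ∧ desk_y = modified.2 then "❎"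
               else "⬛" ]) [] ]) []

-- ===== PORT B =====
-- desk[y-1][x-1] = mark, guarded by the bounds check, as in Source B.
def pvPut (desk : List (List String)) (x y : Int) (mark : String) : List (List String) :=
  if 1 ≤ x ∧ x ≤ 8 ∧ 1 ≤ y ∧ y ≤ 8 then
    desk.set (y - 1).toNat ((desk.getD (y - 1).toNat []).set (x - 1).toNat mark)
  else desk

def generateDesk_alt (initially : Int × Int) (modified : Int × Int) : List (List String) :=
  pvPut (pvPut (List.replicate 8 (List.replicate 8 "⬛")) modified.1 modified.2 "❎")
    initially.1 initially.2 "❌"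

-- ===== PRECONDITION & SPEC =====
def Spec_generateDesk (initially : Int × Int) (modified : Int × Int) (out : List (List String)) : Prop := out = generateDesk_alt initially modified
instance (initially : Int × Int) (modified : Int × Int) (out : List (List String)) : Decidable (Spec_generateDesk initially modified out) := by unfold Spec_generateDesk; infer_instance

-- ===== CLAIM (what is proved, stated in full; the proofs are below) =====
def Claim_equal_generateDesk : Prop := ∀ (initially : Int × Int) (modified : Int × Int), Dom_generateDesk initially modified → Spec_generateDesk initially modified (generateDesk initially modified)

-- ===== LEMMAS AND PROOFS =====

theorem foldl_app_map {α β : Type} (f : α → β) :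
    ∀ (l : List α) (init : List β),
      l.foldl (fun acc x => acc ++ [f x]) init = init ++ l.map f := by
  intro l
  induction l with
  | nil => simp
  | cons a t ih => intro init; simp [List.foldl, ih]

theorem generateDesk_eq_map (initially modified : Int × Int) :
    generateDesk initially modified =
      ([1,2,3,4,5,6,7,8] : List Int).map (fun desk_y =>
        ([1,2,3,4,5,6,7,8] : List Int).map (fun desk_x =>
          if desk_x = initially.1 ∧ desk_y = initially.2 then "❌"
          else if desk_x = modified.1 ∧ desk_y = modified.2 then "❎"
          else "⬛")) := by
  have hR : PySem.List.pyRange 1 9 1 = ([1,2,3,4,5,6,7,8] : List Int) := by decide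
  unfold generateDesk
  rw [hR, foldl_app_map]
  simp only [List.nil_append]
  refine List.map_congr_left ?_
  intro y _
  rw [foldl_app_map]
  simp

theorem pvPut_length (d : List (List String)) (x y : Int) (mark : String) :
    (pvPut d x y mark).length = d.length := by
  unfold pvPut; split <;> simp

theorem pvPut_getElem (d : List (List String)) (x y : Int) (mark : String)
    (r : Nat) (hr : r < (pvPut d x y mark).length) (hr' : r < d.length) :
    (pvPut d x y mark)[r] =
      if 1 ≤ x ∧ x ≤ 8 ∧ 1 ≤ y ∧ y ≤ 8 ∧ y = (r : Int) + 1 then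
        d[r].set (x - 1).toNat mark
      else d[r] := by
  unfold pvPut
  split
  · rename_i h
    rw [List.getElem_set]
    obtain ⟨h1, h2, h3, h4⟩ := h
    by_cases hy : (y - 1).toNat = r
    · have hc : 1 ≤ x ∧ x ≤ 8 ∧ 1 ≤ y ∧ y ≤ 8 ∧ y = (r : Int) + 1 := by omega
      simp only [if_pos hy, if_pos hc]
      subst hy
      rw [List.getD_eq_getElem d [] hr']
    · have hc : ¬(1 ≤ x ∧ x ≤ 8 ∧ 1 ≤ y ∧ y ≤ 8 ∧ y = (r : Int) + 1) := by omega
      simp only [if_neg hy, if_neg hc]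
  · rename_i h
    have hc : ¬(1 ≤ x ∧ x ≤ 8 ∧ 1 ≤ y ∧ y ≤ 8 ∧ y = (r : Int) + 1) := by
      intro hcon; exact h ⟨hcon.1, hcon.2.1, hcon.2.2.1, hcon.2.2.2.1⟩
    simp only [if_neg hc]

theorem alt_row (initially modified : Int × Int) (r : Nat)
    (h : r < (generateDesk_alt initially modified).length) :
    (generateDesk_alt initially modified)[r] =
      (if 1 ≤ initially.1 ∧ initially.1 ≤ 8 ∧ 1 ≤ initially.2 ∧ initially.2 ≤ 8 ∧
            initially.2 = (r : Int) + 1 then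
        (if 1 ≤ modified.1 ∧ modified.1 ≤ 8 ∧ 1 ≤ modified.2 ∧ modified.2 ≤ 8 ∧
              modified.2 = (r : Int) + 1 then
            (List.replicate 8 "⬛").set (modified.1 - 1).toNat "❎"
          else List.replicate 8 "⬛").set (initially.1 - 1).toNat "❌"
       else
        (if 1 ≤ modified.1 ∧ modified.1 ≤ 8 ∧ 1 ≤ modified.2 ∧ modified.2 ≤ 8 ∧
              modified.2 = (r : Int) + 1 then
            (List.replicate 8 "⬛").set (modified.1 - 1).toNat "❎"
          else List.replicate 8 "⬛")) := by
  have hr8 : r < 8 := by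
    have := h
    unfold generateDesk_alt at this
    rw [pvPut_length, pvPut_length] at this
    simpa using this
  have hb : r < (List.replicate 8 (List.replicate 8 "⬛") : List (List String)).length := by
    simpa using hr8
  have hm : r < (pvPut (List.replicate 8 (List.replicate 8 "⬛")) modified.1 modified.2 "❎").length := by
    rw [pvPut_length]; exact hb
  unfold generateDesk_alt
  refine Eq.trans (pvPut_getElem _ initially.1 initially.2 "❌" r (by unfold generateDesk_alt at h; exact h) hm) ?_
  rw [pvPut_getElem _ modified.1 modified.2 "❎" r hm hb, List.getElem_replicate]

theorem alt_length (initially modified : Int × Int) :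
    (generateDesk_alt initially modified).length = 8 := by
  unfold generateDesk_alt; rw [pvPut_length, pvPut_length]; simp

theorem generateDesk_spec : Claim_equal_generateDesk := by
  unfold Claim_equal_generateDesk Spec_generateDesk
  intro initially modified _
  rw [generateDesk_eq_map]
  apply List.ext_getElem
  · rw [alt_length]; rfl
  · intro r hr1 hr2
    have hr8 : r < 8 := by simpa using hr1
    rw [alt_row initially modified r hr2]
    have hy : (([1,2,3,4,5,6,7,8] : List Int))[r]'(by simpa using hr8) = (r : Int) + 1 := by
      interval_cases r <;> rfl
    simp only [List.getElem_map, hy]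
    apply List.ext_getElem
    · split_ifs <;> simp
    · intro c hc1 hc2
      have hc8 : c < 8 := by simpa using hc1
      have hx : (([1,2,3,4,5,6,7,8] : List Int))[c]'(by simpa using hc8) = (c : Int) + 1 := by
        interval_cases c <;> rfl
      simp only [List.getElem_map, hx]
      by_cases hI : 1 ≤ initially.1 ∧ initially.1 ≤ 8 ∧ 1 ≤ initially.2 ∧ initially.2 ≤ 8 ∧
          initially.2 = (r : Int) + 1
      · by_cases hIx : (initially.1 - 1).toNat = c
        · simp only [if_pos hI, List.getElem_set, if_pos hIx]
          obtain ⟨a1, a2, a3, a4, a5⟩ := hI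
          split_ifs <;> first | rfl | omega
        · simp only [if_pos hI, List.getElem_set, if_neg hIx]
          obtain ⟨a1, a2, a3, a4, a5⟩ := hI
          by_cases hM : 1 ≤ modified.1 ∧ modified.1 ≤ 8 ∧ 1 ≤ modified.2 ∧ modified.2 ≤ 8 ∧
              modified.2 = (r : Int) + 1
          · obtain ⟨b1, b2, b3, b4, b5⟩ := hM
            simp only [if_pos (⟨b1, b2, b3, b4, b5⟩ :
              1 ≤ modified.1 ∧ modified.1 ≤ 8 ∧ 1 ≤ modified.2 ∧ modified.2 ≤ 8 ∧
                modified.2 = (r : Int) + 1), List.getElem_set, List.getElem_replicate]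
            split_ifs <;> first | rfl | omega
          · simp only [if_neg hM, List.getElem_replicate]
            split_ifs <;> first | rfl | omega
      · simp only [if_neg hI]
        by_cases hM : 1 ≤ modified.1 ∧ modified.1 ≤ 8 ∧ 1 ≤ modified.2 ∧ modified.2 ≤ 8 ∧
            modified.2 = (r : Int) + 1
        · obtain ⟨b1, b2, b3, b4, b5⟩ := hM
          simp only [if_pos (⟨b1, b2, b3, b4, b5⟩ :
            1 ≤ modified.1 ∧ modified.1 ≤ 8 ∧ 1 ≤ modified.2 ∧ modified.2 ≤ 8 ∧
              modified.2 = (r : Int) + 1), List.getElem_set, List.getElem_replicate]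
          split_ifs <;> first | rfl | omega
        · simp only [if_neg hM, List.getElem_replicate]
          split_ifs <;> first | rfl | omega
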